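-- pv_equiv track=rewrite | github.com/malteristo/reflow | src/mcp_server/protocol/message_handler.py | sanitize_query
-- ===== SOURCE A (Python) =====
-- def sanitize_query(query: str) -> str:
--     """
--     Sanitize a query string to prevent command injection.
--
--     Args:
--         query: Raw query string
--
--     Returns:
--         Sanitized query
--     """
--     if not isinstance(query, str):
--         raise ValueError("Query must be a string")
--
--     # Remove potentially dangerous characters
--     dangerous_chars = [";", "&", "|", "`", "$", "(", ")", "<", ">"]
--     sanitized = query
--
--     for char in dangerous_chars:
--         sanitized = sanitized.replace(char, "")
--
--     # Limit length to prevent DoS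
--     max_length = 10000
--     if len(sanitized) > max_length:
--         sanitized = sanitized[:max_length]
--
--     return sanitized.strip()
-- ===== SOURCE B (Python) =====
-- _DANGEROUS = frozenset(";&|`$()<>")
--
-- def sanitize_query(query: str) -> str:
--     if not isinstance(query, str):
--         raise ValueError("Query must be a string")
--     # single pass: keep only non-dangerous characters
--     sanitized = ''.join(c for c in query if c not in _DANGEROUS)
--     if len(sanitized) > 10000:
--         sanitized = sanitized[:10000]
--     return sanitized.strip()
-- ===== Notes on version B (the rewrite author's own statement) =====
-- stated objective: idiomatic
-- what changed: Replaces nine sequential full-string str.replace passes (one rescan per banned character) with a single pass over the query filtering each character against a frozenset of the nine dangerous characters; the length cap and strip are unchanged.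
import Mathlib
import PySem

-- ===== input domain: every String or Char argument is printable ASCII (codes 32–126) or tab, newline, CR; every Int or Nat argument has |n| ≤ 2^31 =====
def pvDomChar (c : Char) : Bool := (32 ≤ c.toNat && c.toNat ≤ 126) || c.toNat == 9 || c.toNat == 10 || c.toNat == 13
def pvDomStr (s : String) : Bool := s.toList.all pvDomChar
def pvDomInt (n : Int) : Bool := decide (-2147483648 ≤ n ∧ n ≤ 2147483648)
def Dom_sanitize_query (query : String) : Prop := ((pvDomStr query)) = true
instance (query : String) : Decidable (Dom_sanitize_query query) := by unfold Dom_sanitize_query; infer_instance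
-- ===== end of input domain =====

-- B replaces A's nine sequential str.replace passes by one filtering pass over the
-- query against a set of the nine dangerous characters (idiomatic, single scan).


-- ===== PORT A =====
def sanitize_query (query : String) : String :=
  let dangerous_chars : List String := [";", "&", "|", "`", "$", "(", ")", "<", ">"]
  let sanitized := dangerous_chars.foldl (fun s ch => PySem.Str.replace s ch "") query
  let sanitized := if PySem.Str.len sanitized > 10000 then PySem.Str.slice sanitized none (some 10000) else sanitized
  PySem.Str.strip sanitized

-- ===== PORT B =====
def sanitize_query_alt (query : String) : String :=
  let dangerous : PySem.Set Char := PySem.Set.ofList ";&|`$()<>".toList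
  let sanitized := String.ofList (query.toList.filter (fun c => !(PySem.Set.contains dangerous c)))
  let sanitized := if PySem.Str.len sanitized > 10000 then PySem.Str.slice sanitized none (some 10000) else sanitized
  PySem.Str.strip sanitized

-- ===== PRECONDITION & SPEC =====
def Spec_sanitize_query (query : String) (out : String) : Prop := out = sanitize_query_alt query
instance (query : String) (out : String) : Decidable (Spec_sanitize_query query out) := by unfold Spec_sanitize_query; infer_instance

-- ===== CLAIM (what is proved, stated in full; the proofs are below) =====
def Claim_equal_sanitize_query : Prop := ∀ (query : String), Dom_sanitize_query query → Spec_sanitize_query query (sanitize_query query)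

-- ===== LEMMAS AND PROOFS =====

-- one step of A's loop: replacing a single character by "" is a filter
lemma go_single (ch : Char) : ∀ (fuel : Nat) (l acc : List Char), l.length ≤ fuel →
    PySem.Chars.replace.go [ch] [] fuel l acc = acc.reverse ++ l.filter (fun c => !(ch == c)) := by
  intro fuel
  induction fuel with
  | zero =>
    intro l acc h
    cases l with
    | nil => simp [PySem.Chars.replace.go]
    | cons c t => simp at h
  | succ n ih =>
    intro l acc h
    cases l with
    | nil => simp [PySem.Chars.replace.go]
    | cons c t =>
      by_cases hc : ch == c
      · simp [PySem.Chars.replace.go, List.isPrefixOf, hc, List.filter_cons,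
              ih t acc (by simpa using Nat.le_of_succ_le_succ h)]
      · simp only [PySem.Chars.replace.go, List.isPrefixOf]
        rw [if_neg (by simp [hc])]
        rw [ih t (c :: acc) (by simpa using Nat.le_of_succ_le_succ h)]
        simp [List.filter_cons, hc]

lemma replace_single (s : List Char) (ch : Char) :
    PySem.Chars.replace s [ch] [] = s.filter (fun c => !(ch == c)) := by
  simp [PySem.Chars.replace, go_single ch s.length s [] (le_refl _)]

-- A's nine-replace chain equals B's one-pass filter, at the list level
lemma chain_eq_filter (q : List Char) :
    PySem.Chars.replace (PySem.Chars.replace (PySem.Chars.replace (PySem.Chars.replace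
      (PySem.Chars.replace (PySem.Chars.replace (PySem.Chars.replace (PySem.Chars.replace
      (PySem.Chars.replace q [';'] []) ['&'] []) ['|'] []) ['`'] []) ['$'] []) ['('] [])
      [')'] []) ['<'] []) ['>'] []
    = q.filter (fun c => !(PySem.Set.contains (PySem.Set.ofList ";&|`$()<>".toList) c)) := by
  simp only [replace_single, List.filter_filter]
  apply List.filter_congr
  intro c _
  rw [show PySem.Set.ofList ";&|`$()<>".toList = [';','&','|','`','$','(',')','<','>'] from by decide]
  simp only [PySem.Set.contains, List.contains_cons, List.contains_nil, Bool.or_false, Bool.not_or, Bool.beq_eq_decide_eq]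
  simp only [eq_comm]
  ac_rfl

-- ===== VERDICT (by name: the statement is the Claim_ definition above) =====
theorem sanitize_query_spec : Claim_equal_sanitize_query := by
  intro query _
  show sanitize_query query = sanitize_query_alt query
  unfold sanitize_query sanitize_query_alt
  simp only [List.foldl]
  have h : (PySem.Str.replace (PySem.Str.replace (PySem.Str.replace (PySem.Str.replace
      (PySem.Str.replace (PySem.Str.replace (PySem.Str.replace (PySem.Str.replace
      (PySem.Str.replace query ";" "") "&" "") "|" "") "`" "") "$" "") "(" "")
      ")" "") "<" "") ">" "")
      = String.ofList (query.toList.filter (fun c => !(PySem.Set.contains (PySem.Set.ofList ";&|`$()<>".toList) c))) := by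
    apply String.toList_inj.mp
    simp only [PySem.Str.toList_replace, String.toList_ofList]
    exact chain_eq_filter query.toList
  rw [h]
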